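-- pv_equiv track=rewrite | github.com/jhillierdavis/advent-of-code-solutions | aoc-2021/aoc-2021-day-19/solution-in-python3/solution.py | get_paired_scanner_based_on_overlap
-- ===== SOURCE A (Python) =====
-- def get_paired_scanner_based_on_overlap(current_scanner_id, md_map, processed_scanner_id_set):
--     overlap_index = None
--     overlap_count = 0
--
--     for i in md_map.keys():
--         if i == current_scanner_id or i in processed_scanner_id_set:
--             continue
--
--         intersect = (set(md_map[i])).intersection(md_map[current_scanner_id])
--         intersect_overlap = len(intersect)
--         if intersect_overlap > overlap_count:
--             overlap_count = intersect_overlap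
--             overlap_index = i
--
--     return overlap_index
-- ===== SOURCE B (Python) =====
-- def get_paired_scanner_based_on_overlap(current_scanner_id, md_map, processed_scanner_id_set):
--     # Inverted index: marker-distance value -> candidate scanner ids containing it.
--     index = {}
--     for sid, mds in md_map.items():
--         if sid == current_scanner_id or sid in processed_scanner_id_set:
--             continue
--         for v in set(mds):
--             index.setdefault(v, []).append(sid)
--
--     # Accumulate overlap counts via the index.
--     counts = {}
--     for v in set(md_map.get(current_scanner_id, ())):
--         for sid in index.get(v, []):
--             counts[sid] = counts.get(sid, 0) + 1
--
--     # First scanner (in md_map order) with strictly maximal positive count.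
--     best = None
--     best_count = 0
--     for sid in md_map:
--         n = counts.get(sid, 0)
--         if n > best_count:
--             best_count = n
--             best = sid
--     return best
-- ===== Notes on version B (the rewrite author's own statement) =====
-- stated objective: alternative
-- what changed: Replaces A's per-candidate set-intersection scan by an inverted index from marker-distance values to candidate scanners, from which per-scanner overlap counts are accumulated in one pass before the same first-maximal selection over the key order.
import Mathlib
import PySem

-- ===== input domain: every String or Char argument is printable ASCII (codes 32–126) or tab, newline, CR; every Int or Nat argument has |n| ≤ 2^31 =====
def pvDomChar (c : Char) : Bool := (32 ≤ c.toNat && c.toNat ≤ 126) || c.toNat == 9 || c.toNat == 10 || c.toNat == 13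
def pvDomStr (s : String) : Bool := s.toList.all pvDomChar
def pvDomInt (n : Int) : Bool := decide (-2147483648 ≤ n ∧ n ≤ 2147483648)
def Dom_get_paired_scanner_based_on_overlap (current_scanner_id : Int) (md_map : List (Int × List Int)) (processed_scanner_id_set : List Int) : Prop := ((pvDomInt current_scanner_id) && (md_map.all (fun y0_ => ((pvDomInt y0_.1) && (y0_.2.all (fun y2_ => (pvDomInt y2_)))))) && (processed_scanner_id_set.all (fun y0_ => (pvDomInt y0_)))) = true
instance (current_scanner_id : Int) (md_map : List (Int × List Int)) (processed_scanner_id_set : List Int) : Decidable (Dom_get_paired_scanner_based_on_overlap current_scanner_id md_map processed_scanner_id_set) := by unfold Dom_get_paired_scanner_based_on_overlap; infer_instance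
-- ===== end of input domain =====

-- B replaces A's per-scanner set-intersection scan by an inverted index (marker-distance → candidate scanners)
-- from which per-scanner overlap counts are accumulated in one pass; same first-maximal / None-if-zero result.

-- ===== PORT A =====
-- md_map[current_scanner_id] raises KeyError when the key is absent and a candidate exists; the port
-- totalises that single lookup with getD [] — exactly those inputs are excluded by Pre_ below.
def get_paired_scanner_based_on_overlap (current_scanner_id : Int) (md_map : List (Int × List Int)) (processed_scanner_id_set : List Int) : Option Int :=
  let d := PySem.Dict.mk md_map
  (((d.keys).foldl (fun (st : Option Int × Int) i =>
      if i = current_scanner_id ∨ i ∈ processed_scanner_id_set then st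
      else
        let intersect := PySem.Set.inter (PySem.Set.ofList (d.getD i [])) (d.getD current_scanner_id [])
        let intersect_overlap : Int := intersect.length
        if intersect_overlap > st.2 then (some i, intersect_overlap) else st)
    (none, 0))).1

-- ===== PORT B =====
def get_paired_scanner_based_on_overlap_alt (current_scanner_id : Int) (md_map : List (Int × List Int)) (processed_scanner_id_set : List Int) : Option Int :=
  let index : PySem.Dict Int (List Int) :=
    md_map.foldl (fun idx pr =>
      if pr.1 = current_scanner_id ∨ pr.1 ∈ processed_scanner_id_set then idx
      else (PySem.Set.ofList pr.2).foldl
             (fun idx v => idx.insert v (idx.getD v [] ++ [pr.1])) idx)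
      PySem.Dict.empty
  let counts : PySem.Dict Int Int :=
    (PySem.Set.ofList ((PySem.Dict.mk md_map).getD current_scanner_id [])).foldl
      (fun cnt v => (index.getD v []).foldl
                      (fun cnt sid => cnt.insert sid (cnt.getD sid 0 + 1)) cnt)
      PySem.Dict.empty
  ((((PySem.Dict.mk md_map).keys).foldl (fun (st : Option Int × Int) sid =>
      let n := counts.getD sid 0
      if n > st.2 then (some sid, n) else st) (none, 0))).1

-- ===== PRECONDITION & SPEC =====
-- Pre_ requires (a) distinct keys — an association list with duplicate keys does not represent any Python
-- dict, so A's first-match behaviour there is accidental — and (b) that current_scanner_id is a key whenever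
-- some candidate scanner exists, since A raises KeyError exactly otherwise.
def Pre_get_paired_scanner_based_on_overlap (current_scanner_id : Int) (md_map : List (Int × List Int)) (processed_scanner_id_set : List Int) : Prop :=
  (md_map.map Prod.fst).Nodup ∧
  ((∃ pr ∈ md_map, pr.1 ≠ current_scanner_id ∧ pr.1 ∉ processed_scanner_id_set) →
    current_scanner_id ∈ md_map.map Prod.fst)
instance (current_scanner_id : Int) (md_map : List (Int × List Int)) (processed_scanner_id_set : List Int) : Decidable (Pre_get_paired_scanner_based_on_overlap current_scanner_id md_map processed_scanner_id_set) := by unfold Pre_get_paired_scanner_based_on_overlap; infer_instance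

def pvWitness_get_paired_scanner_based_on_overlap : Int × (List (Int × List Int)) × List Int :=
  (0, [(0, [1, 2]), (1, [2, 3])], [])

def Spec_get_paired_scanner_based_on_overlap (current_scanner_id : Int) (md_map : List (Int × List Int)) (processed_scanner_id_set : List Int) (out : Option Int) : Prop := out = get_paired_scanner_based_on_overlap_alt current_scanner_id md_map processed_scanner_id_set
instance (current_scanner_id : Int) (md_map : List (Int × List Int)) (processed_scanner_id_set : List Int) (out : Option Int) : Decidable (Spec_get_paired_scanner_based_on_overlap current_scanner_id md_map processed_scanner_id_set out) := by unfold Spec_get_paired_scanner_based_on_overlap; infer_instance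

-- ===== CLAIM (what is proved, stated in full; the proofs are below) =====
def Claim_equal_get_paired_scanner_based_on_overlap : Prop := ∀ (current_scanner_id : Int) (md_map : List (Int × List Int)) (processed_scanner_id_set : List Int), Dom_get_paired_scanner_based_on_overlap current_scanner_id md_map processed_scanner_id_set → Pre_get_paired_scanner_based_on_overlap current_scanner_id md_map processed_scanner_id_set → Spec_get_paired_scanner_based_on_overlap current_scanner_id md_map processed_scanner_id_set (get_paired_scanner_based_on_overlap current_scanner_id md_map processed_scanner_id_set)


-- ===== LEMMAS AND PROOFS =====

-- the filter predicate characterising which candidates the inverted index stores under value v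
def pvGood (c : Int) (p : List Int) (v : Int) (pr : Int × List Int) : Bool :=
  (!decide (pr.1 = c ∨ pr.1 ∈ p)) && decide (v ∈ pr.2)

lemma pv_idx_inner (l : List Int) (d : PySem.Dict Int (List Int)) (sid v : Int) :
    (l.foldl (fun d x => d.insert x (d.getD x [] ++ [sid])) d).getD v []
      = d.getD v [] ++ List.replicate (l.count v) sid := by
  induction l generalizing d with
  | nil => simp
  | cons x l ih =>
    simp only [List.foldl_cons]
    rw [ih]
    by_cases h : v = x
    · subst h
      rw [PySem.Dict.getD_insert_self]
      simp [List.replicate_succ, List.append_assoc]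
    · rw [PySem.Dict.getD_insert]
      simp only [if_neg h]
      have hxv : ¬ x = v := fun he => h he.symm
      simp [hxv]

lemma pv_idx_char (c : Int) (p : List Int) (m : List (Int × List Int))
    (d : PySem.Dict Int (List Int)) (v : Int) :
    (m.foldl (fun idx pr =>
        if pr.1 = c ∨ pr.1 ∈ p then idx
        else (PySem.Set.ofList pr.2).foldl
               (fun idx v => idx.insert v (idx.getD v [] ++ [pr.1])) idx) d).getD v []
      = d.getD v [] ++ (m.filter (pvGood c p v)).map Prod.fst := by
  induction m generalizing d with
  | nil => simp
  | cons pr m ih =>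
    simp only [List.foldl_cons]
    by_cases hsk : pr.1 = c ∨ pr.1 ∈ p
    · rw [if_pos hsk, ih]
      simp [pvGood, hsk]
    · rw [if_neg hsk, ih, pv_idx_inner]
      by_cases hv : v ∈ pr.2
      · have hc : (PySem.Set.ofList pr.2).count v = 1 := by
          apply List.count_eq_one_of_mem (PySem.Set.nodup_ofList pr.2)
          exact (PySem.Set.mem_ofList _ _).mpr hv
        rw [hc]
        simp [pvGood, hsk, hv, List.append_assoc]
      · have hc : (PySem.Set.ofList pr.2).count v = 0 := by
          rw [List.count_eq_zero]
          exact fun hm => hv ((PySem.Set.mem_ofList _ _).mp hm)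
        rw [hc]
        simp [pvGood, hsk, hv]

lemma pv_counts_char (index : PySem.Dict Int (List Int)) (L : List Int)
    (cnt : PySem.Dict Int Int) (sid : Int) :
    (L.foldl (fun cnt v => (index.getD v []).foldl
                (fun cnt sid => cnt.insert sid (cnt.getD sid 0 + 1)) cnt) cnt).getD sid 0
      = cnt.getD sid 0 + (L.map (fun v => ((index.getD v []).count sid : Int))).sum := by
  induction L generalizing cnt with
  | nil => simp
  | cons v L ih =>
    simp only [List.foldl_cons, List.map_cons, List.sum_cons]
    rw [ih, PySem.Dict.getD_foldl_insert_add_one]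
    ring

lemma pv_filter_mem_length_comm (a b : List Int) (ha : a.Nodup) (hb : b.Nodup) :
    (a.filter (· ∈ b)).length = (b.filter (· ∈ a)).length := by
  have hperm : (a.filter (· ∈ b)).Perm (b.filter (· ∈ a)) := by
    apply List.perm_of_nodup_nodup_toFinset_eq (ha.filter _) (hb.filter _)
    ext x
    simp [and_comm]
  exact hperm.length_eq

lemma pv_final_fold (c : Int) (p : List Int) (ks : List Int) (fA fB : Int → Int)
    (h1 : ∀ i ∈ ks, ¬(i = c ∨ i ∈ p) → fA i = fB i ∧ 0 ≤ fA i)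
    (h2 : ∀ i ∈ ks, (i = c ∨ i ∈ p) → fB i = 0) :
    ∀ st : Option Int × Int, 0 ≤ st.2 →
      ks.foldl (fun st i => if i = c ∨ i ∈ p then st
                            else if fA i > st.2 then (some i, fA i) else st) st
        = ks.foldl (fun st i => if fB i > st.2 then (some i, fB i) else st) st := by
  induction ks with
  | nil => intro st _; rfl
  | cons i ks ih =>
    intro st hst
    simp only [List.foldl_cons]
    have h1' := fun j hj => h1 j (List.mem_cons_of_mem _ hj)
    have h2' := fun j hj => h2 j (List.mem_cons_of_mem _ hj)
    by_cases hsk : i = c ∨ i ∈ p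
    · rw [if_pos hsk, h2 i (List.mem_cons_self) hsk, if_neg (by omega)]
      exact ih h1' h2' st hst
    · obtain ⟨heq, hpos⟩ := h1 i (List.mem_cons_self) hsk
      rw [if_neg hsk, ← heq]
      by_cases hgt : fA i > st.2
      · rw [if_pos hgt]
        exact ih h1' h2' (some i, fA i) hpos
      · rw [if_neg hgt]
        exact ih h1' h2' st hst

-- proof-side names for B's two dictionaries (identical terms to the port's let-bound values)
def pvIndex (c : Int) (p : List Int) (m : List (Int × List Int)) : PySem.Dict Int (List Int) :=
  m.foldl (fun idx pr =>
      if pr.1 = c ∨ pr.1 ∈ p then idx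
      else (PySem.Set.ofList pr.2).foldl
             (fun idx v => idx.insert v (idx.getD v [] ++ [pr.1])) idx)
    PySem.Dict.empty

def pvCounts (c : Int) (p : List Int) (m : List (Int × List Int)) : PySem.Dict Int Int :=
  (PySem.Set.ofList ((PySem.Dict.mk m).getD c [])).foldl
    (fun cnt v => ((pvIndex c p m).getD v []).foldl
                    (fun cnt sid => cnt.insert sid (cnt.getD sid 0 + 1)) cnt)
    PySem.Dict.empty

lemma pvCounts_getD (c : Int) (p : List Int) (m : List (Int × List Int)) (i : Int) :
    (pvCounts c p m).getD i 0
      = ((PySem.Set.ofList ((PySem.Dict.mk m).getD c [])).map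
          (fun v => (((m.filter (pvGood c p v)).map Prod.fst).count i : Int))).sum := by
  unfold pvCounts
  rw [pv_counts_char]
  have h : ∀ v : Int, (pvIndex c p m).getD v [] = (m.filter (pvGood c p v)).map Prod.fst := by
    intro v
    unfold pvIndex
    rw [pv_idx_char]
    simp
  simp only [h, PySem.Dict.getD_empty]
  ring

lemma pv_mem_idxlist (c : Int) (p : List Int) (m : List (Int × List Int))
    (hnd : (m.map Prod.fst).Nodup) (v i : Int) (xs : List Int)
    (hmem : (i, xs) ∈ m) :
    i ∈ (m.filter (pvGood c p v)).map Prod.fst ↔ pvGood c p v (i, xs) = true := by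
  constructor
  · intro h
    obtain ⟨pr, hpr, hfst⟩ := List.mem_map.mp h
    have hprm := (List.mem_filter.mp hpr).1
    have hg := (List.mem_filter.mp hpr).2
    have hpe : pr = (i, xs) := List.inj_on_of_nodup_map hnd hprm hmem (by simpa using hfst)
    rwa [hpe] at hg
  · intro hg
    exact List.mem_map.mpr ⟨(i, xs), List.mem_filter.mpr ⟨hmem, hg⟩, rfl⟩

lemma pv_idxlist_nodup (c : Int) (p : List Int) (m : List (Int × List Int))
    (hnd : (m.map Prod.fst).Nodup) (v : Int) :
    ((m.filter (pvGood c p v)).map Prod.fst).Nodup :=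
  hnd.sublist ((m.filter_sublist).map Prod.fst)

lemma pvCounts_cand (c : Int) (p : List Int) (m : List (Int × List Int))
    (hnd : (m.map Prod.fst).Nodup) (i : Int) (xs : List Int)
    (hmem : (i, xs) ∈ m) (hsk : ¬(i = c ∨ i ∈ p)) :
    (pvCounts c p m).getD i 0
      = (((PySem.Set.ofList ((PySem.Dict.mk m).getD c [])).filter (· ∈ xs)).length : Int) := by
  rw [pvCounts_getD]
  have hcnt : ∀ v : Int, (((m.filter (pvGood c p v)).map Prod.fst).count i : Int)
      = if v ∈ xs then 1 else 0 := by
    intro v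
    by_cases hv : v ∈ xs
    · have hg : pvGood c p v (i, xs) = true := by simp [pvGood, hsk, hv]
      have hmem' := (pv_mem_idxlist c p m hnd v i xs hmem).mpr hg
      rw [List.count_eq_one_of_mem (pv_idxlist_nodup c p m hnd v) hmem']
      simp [hv]
    · have hni : i ∉ (m.filter (pvGood c p v)).map Prod.fst := by
        intro h
        have := (pv_mem_idxlist c p m hnd v i xs hmem).mp h
        simp [pvGood, hsk, hv] at this
      rw [List.count_eq_zero.mpr hni]
      simp [hv]
  have hmap : ((PySem.Set.ofList ((PySem.Dict.mk m).getD c [])).map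
        (fun v => (((m.filter (pvGood c p v)).map Prod.fst).count i : Int)))
      = ((PySem.Set.ofList ((PySem.Dict.mk m).getD c [])).map
        (fun v => if (fun x => decide (x ∈ xs)) v = true then (1 : Int) else 0)) := by
    apply List.map_congr_left
    intro v _
    rw [hcnt v]
    simp
  rw [hmap, PySem.List.sum_map_ite_one_zero, List.countP_eq_length_filter]

lemma pvCounts_skip (c : Int) (p : List Int) (m : List (Int × List Int))
    (i : Int) (hsk : i = c ∨ i ∈ p) :
    (pvCounts c p m).getD i 0 = 0 := by
  rw [pvCounts_getD]
  have hcnt : ∀ v : Int, (((m.filter (pvGood c p v)).map Prod.fst).count i : Int) = 0 := by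
    intro v
    have hni : i ∉ (m.filter (pvGood c p v)).map Prod.fst := by
      intro h
      obtain ⟨pr, hpr, hfst⟩ := List.mem_map.mp h
      have hg := (List.mem_filter.mp hpr).2
      have hng : ¬(pr.1 = c ∨ pr.1 ∈ p) := by
        simp only [pvGood, Bool.and_eq_true, Bool.not_eq_eq_eq_not, Bool.not_true,
          decide_eq_false_iff_not] at hg
        exact hg.1
      rw [hfst] at hng
      exact hng hsk
    rw [List.count_eq_zero.mpr hni]
    simp
  have hmap : ((PySem.Set.ofList ((PySem.Dict.mk m).getD c [])).map
        (fun v => (((m.filter (pvGood c p v)).map Prod.fst).count i : Int)))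
      = ((PySem.Set.ofList ((PySem.Dict.mk m).getD c [])).map (fun _ => (0 : Int))) := by
    apply List.map_congr_left
    intro v _
    exact hcnt v
  rw [hmap]
  simp

lemma pv_fA_eq_fB (c : Int) (p : List Int) (m : List (Int × List Int))
    (hnd : (m.map Prod.fst).Nodup) (i : Int) (xs : List Int)
    (hmem : (i, xs) ∈ m) (hsk : ¬(i = c ∨ i ∈ p)) :
    ((PySem.Set.inter (PySem.Set.ofList ((PySem.Dict.mk m).getD i []))
        ((PySem.Dict.mk m).getD c [])).length : Int)
      = (pvCounts c p m).getD i 0 := by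
  rw [pvCounts_cand c p m hnd i xs hmem hsk]
  rw [PySem.Dict.getD_of_mem_items (PySem.Dict.mk m) hmem hnd []]
  have hA : PySem.Set.inter (PySem.Set.ofList xs) ((PySem.Dict.mk m).getD c [])
      = (PySem.Set.ofList xs).filter (· ∈ (PySem.Dict.mk m).getD c []) := by
    simp [PySem.Set.inter]
  rw [hA]
  congr 1
  have h1 : (PySem.Set.ofList xs).filter (· ∈ (PySem.Dict.mk m).getD c [])
      = (PySem.Set.ofList xs).filter (· ∈ PySem.Set.ofList ((PySem.Dict.mk m).getD c [])) := by
    apply List.filter_congr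
    intro x _
    simp [PySem.Set.mem_ofList]
  have h2 : (PySem.Set.ofList ((PySem.Dict.mk m).getD c [])).filter (· ∈ xs)
      = (PySem.Set.ofList ((PySem.Dict.mk m).getD c [])).filter (· ∈ PySem.Set.ofList xs) := by
    apply List.filter_congr
    intro x _
    simp [PySem.Set.mem_ofList]
  rw [h1, h2]
  exact pv_filter_mem_length_comm _ _ (PySem.Set.nodup_ofList _) (PySem.Set.nodup_ofList _)

-- ===== VERDICT (by name: the statement is the Claim_ definition above) =====
theorem get_paired_scanner_based_on_overlap_spec : Claim_equal_get_paired_scanner_based_on_overlap := by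
  intro c m p _ hpre
  obtain ⟨hnd, -⟩ := hpre
  unfold Spec_get_paired_scanner_based_on_overlap
  refine congrArg Prod.fst
    (pv_final_fold c p ((PySem.Dict.mk m).keys)
      (fun i => ((PySem.Set.inter (PySem.Set.ofList ((PySem.Dict.mk m).getD i []))
          ((PySem.Dict.mk m).getD c [])).length : Int))
      (fun i => (pvCounts c p m).getD i 0) ?_ ?_ (none, 0) (by norm_num))
  · intro i hi hsk
    have hi' : i ∈ m.map Prod.fst := hi
    obtain ⟨pr, hpr, hfst⟩ := List.mem_map.mp hi'
    have hmem : (i, pr.2) ∈ m := by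
      have : pr = (i, pr.2) := by
        ext
        · exact hfst
        · rfl
      rwa [this] at hpr
    exact ⟨pv_fA_eq_fB c p m hnd i pr.2 hmem hsk, Int.natCast_nonneg _⟩
  · intro i _ hsk
    exact pvCounts_skip c p m i hsk
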